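-- pv_equiv track=rewrite | github.com/acairns07/airsenal-ops-management | backend/server.py | _collect_section
-- ===== SOURCE A (Python) =====
-- from typing import List, Optional, Dict, Any, Set
--
-- def _collect_section(logs: List[str], start_keywords: List[str], stop_keywords: List[str]) -> List[str]:
--     if not logs:
--         return []
--     start_lower = [kw.lower() for kw in start_keywords]
--     stop_lower = [kw.lower() for kw in stop_keywords]
--     collecting = False
--     section: List[str] = []
--
--     for line in logs:
--         lower = line.lower()
--         if not collecting and any(keyword in lower for keyword in start_lower):
--             collecting = True
--         if collecting:
--             if any(keyword in lower for keyword in stop_lower):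
--                 break
--             section.append(line)
--     return section
-- ===== SOURCE B (Python) =====
-- def _collect_section(logs, start_keywords, stop_keywords):
--     start_lower = [kw.lower() for kw in start_keywords]
--     stop_lower = [kw.lower() for kw in stop_keywords]
--     lowered = [line.lower() for line in logs]
--     starts = [any(k in low for k in start_lower) for low in lowered]
--     if True not in starts:
--         return []
--     s = starts.index(True)
--     stops = [any(k in low for k in stop_lower) for low in lowered[s:]]
--     e = s + stops.index(True) if True in stops else len(logs)
--     return logs[s:e]
-- ===== Notes on version B (the rewrite author's own statement) =====
-- stated objective: alternative
-- what changed: Replaces the flag-driven single loop that appends line by line with a mask-based formulation: lower every line once, build a boolean start-match mask and a stop-match mask, compute the two cut indices with list.index, and return one slice logs[s:e] instead of accumulating.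
import Mathlib
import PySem

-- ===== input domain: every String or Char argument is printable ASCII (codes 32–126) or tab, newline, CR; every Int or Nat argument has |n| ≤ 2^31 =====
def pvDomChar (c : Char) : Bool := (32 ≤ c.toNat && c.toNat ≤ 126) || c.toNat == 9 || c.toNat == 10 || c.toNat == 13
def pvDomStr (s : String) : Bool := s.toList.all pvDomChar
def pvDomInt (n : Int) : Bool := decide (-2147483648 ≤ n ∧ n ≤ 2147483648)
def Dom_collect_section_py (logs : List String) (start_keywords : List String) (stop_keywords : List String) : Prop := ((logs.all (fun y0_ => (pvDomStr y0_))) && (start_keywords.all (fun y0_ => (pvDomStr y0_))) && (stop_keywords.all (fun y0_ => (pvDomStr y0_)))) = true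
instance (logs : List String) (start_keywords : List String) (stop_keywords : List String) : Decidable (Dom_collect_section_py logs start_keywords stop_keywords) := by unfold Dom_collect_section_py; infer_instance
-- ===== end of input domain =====

-- B replaces A's flag-driven loop with keyword-match boolean masks and a single slice; objective: alternative.

-- ===== PORT A =====
-- the for-loop of A: state is the 'collecting' flag; 'break' returns the section built so far
def pvALoop (startL stopL : List String) (collecting : Bool) : List String → List String
  | [] => []
  | line :: rest =>
    let lower := PySem.Str.lower line
    let collecting :=
      if !collecting && startL.any (fun k => PySem.Str.isIn k lower) then true else collecting
    if collecting then
      if stopL.any (fun k => PySem.Str.isIn k lower) then []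
      else line :: pvALoop startL stopL collecting rest
    else pvALoop startL stopL collecting rest

def collect_section_py (logs : List String) (start_keywords : List String) (stop_keywords : List String) : List String :=
  if logs = [] then []
  else
    let start_lower := start_keywords.map PySem.Str.lower
    let stop_lower := stop_keywords.map PySem.Str.lower
    pvALoop start_lower stop_lower false logs

-- ===== PORT B =====
-- Source B: lower every line once, build the start-match mask, locate the first True with
-- list.index, build the stop-match mask of the tail, and return one slice logs[s:e]
def collect_section_py_alt (logs : List String) (start_keywords : List String) (stop_keywords : List String) : List String :=
  let start_lower := start_keywords.map PySem.Str.lower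
  let stop_lower := stop_keywords.map PySem.Str.lower
  let lowered := logs.map PySem.Str.lower
  let starts := lowered.map (fun low => start_lower.any (fun k => PySem.Str.isIn k low))
  match PySem.List.index? starts true with
  | none => []
  | some s =>
    let stops := (lowered.drop s).map (fun low => stop_lower.any (fun k => PySem.Str.isIn k low))
    let e : Nat :=
      match PySem.List.index? stops true with
      | some j => s + j
      | none => logs.length
    PySem.List.slice logs (some (s : Int)) (some (e : Int))

-- ===== PRECONDITION & SPEC =====
def Spec_collect_section_py (logs : List String) (start_keywords : List String) (stop_keywords : List String) (out : List String) : Prop := out = collect_section_py_alt logs start_keywords stop_keywords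
instance (logs : List String) (start_keywords : List String) (stop_keywords : List String) (out : List String) : Decidable (Spec_collect_section_py logs start_keywords stop_keywords out) := by unfold Spec_collect_section_py; infer_instance

-- ===== CLAIM =====
def Claim_equal_collect_section_py : Prop := ∀ (logs : List String) (start_keywords : List String) (stop_keywords : List String), Dom_collect_section_py logs start_keywords stop_keywords → Spec_collect_section_py logs start_keywords stop_keywords (collect_section_py logs start_keywords stop_keywords)

-- ===== LEMMAS AND PROOFS =====
-- proof-only helpers: first matching index, and collect-until-stop
def pvBFind (startL : List String) : List String → Nat → Option Nat
  | [], _ => none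
  | line :: rest, i =>
    if startL.any (fun k => PySem.Str.isIn k (PySem.Str.lower line)) then some i
    else pvBFind startL rest (i + 1)

def pvBCollect (stopL : List String) : List String → List String
  | [] => []
  | line :: rest =>
    if stopL.any (fun k => PySem.Str.isIn k (PySem.Str.lower line)) then []
    else line :: pvBCollect stopL rest

theorem pvALoop_true (startL stopL : List String) (xs : List String) :
    pvALoop startL stopL true xs = pvBCollect stopL xs := by
  induction xs with
  | nil => rfl
  | cons line rest ih => simp [pvALoop, pvBCollect, ih]

theorem pvBFind_shift (startL : List String) (xs : List String) (n : Nat) :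
    pvBFind startL xs (n + 1) = (pvBFind startL xs n).map (· + 1) := by
  induction xs generalizing n with
  | nil => rfl
  | cons line rest ih =>
    simp only [pvBFind]
    split
    · rfl
    · exact ih (n + 1)

theorem pvALoop_false (startL stopL : List String) (xs : List String) :
    pvALoop startL stopL false xs =
      match pvBFind startL xs 0 with
      | none => []
      | some i => pvBCollect stopL (xs.drop i) := by
  induction xs with
  | nil => rfl
  | cons line rest ih =>
    by_cases h : startL.any (fun k => PySem.Str.isIn k (PySem.Str.lower line)) = true
    · simp only [pvALoop, pvBFind, h]
      simp [pvBCollect, pvALoop_true]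
    · have h' : (startL.any fun k => PySem.Str.isIn k (PySem.Str.lower line)) = false := by
        simpa using h
      rw [show pvALoop startL stopL false (line :: rest) = pvALoop startL stopL false rest from
            by simp only [pvALoop, h', Bool.not_false, Bool.true_and, Bool.false_eq_true, if_false],
          show pvBFind startL (line :: rest) 0 = (pvBFind startL rest 0).map (· + 1) from
            by rw [pvBFind, if_neg (by exact h), pvBFind_shift], ih]
      cases pvBFind startL rest 0 <;> simp

-- B's mask search agrees with the direct first-match scan
theorem pvBFind_eq (startL : List String) (xs : List String) :
    pvBFind startL xs 0 =
      PySem.List.index? (xs.map (fun l => startL.any (fun k => PySem.Str.isIn k (PySem.Str.lower l)))) true := by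
  induction xs with
  | nil => rfl
  | cons line rest ih =>
    by_cases h : startL.any (fun k => PySem.Str.isIn k (PySem.Str.lower line)) = true
    · rw [show pvBFind startL (line :: rest) 0 = some 0 from by rw [pvBFind, if_pos h],
          List.map_cons, h, PySem.List.index?_cons_self]
    · rw [show pvBFind startL (line :: rest) 0 = pvBFind startL rest 1 from by
            rw [pvBFind, if_neg h],
          show (1 : Nat) = 0 + 1 from rfl, pvBFind_shift, ih, List.map_cons,
          show (startL.any fun k => PySem.Str.isIn k (PySem.Str.lower line)) = false from by simpa using h,
          PySem.List.index?_cons_of_ne (x := false) (v := true) _ (by decide)]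

-- B's stop mask + take agrees with collect-until-stop
theorem pvBCollect_eq (stopL : List String) (ys : List String) :
    pvBCollect stopL ys =
      match PySem.List.index? (ys.map (fun l => stopL.any (fun k => PySem.Str.isIn k (PySem.Str.lower l)))) true with
      | some j => ys.take j
      | none => ys := by
  induction ys with
  | nil => rfl
  | cons line rest ih =>
    by_cases h : stopL.any (fun k => PySem.Str.isIn k (PySem.Str.lower line)) = true
    · rw [show pvBCollect stopL (line :: rest) = [] from by rw [pvBCollect, if_pos h],
          List.map_cons, h, PySem.List.index?_cons_self]
      rfl
    · rw [show pvBCollect stopL (line :: rest) = line :: pvBCollect stopL rest from by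
            rw [pvBCollect, if_neg h],
          ih, List.map_cons,
          show (stopL.any fun k => PySem.Str.isIn k (PySem.Str.lower line)) = false from by simpa using h,
          PySem.List.index?_cons_of_ne (x := false) (v := true) _ (by decide)]
      cases PySem.List.index? (rest.map (fun l => stopL.any fun k => PySem.Str.isIn k (PySem.Str.lower l))) true <;>
        simp [List.take_succ_cons]

-- ===== VERDICT =====
theorem collect_section_py_spec : Claim_equal_collect_section_py := by
  intro logs start_keywords stop_keywords _
  unfold Spec_collect_section_py collect_section_py collect_section_py_alt
  by_cases hE : logs = []
  · subst hE; rfl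
  · rw [if_neg hE]
    simp only
    rw [pvALoop_false, pvBFind_eq, List.map_map]
    have hfun : ((fun low => (start_keywords.map PySem.Str.lower).any fun k => PySem.Str.isIn k low) ∘ PySem.Str.lower)
        = (fun l => (start_keywords.map PySem.Str.lower).any fun k => PySem.Str.isIn k (PySem.Str.lower l)) := rfl
    rw [hfun]
    cases hs : PySem.List.index? (logs.map (fun l => (start_keywords.map PySem.Str.lower).any fun k => PySem.Str.isIn k (PySem.Str.lower l))) true with
    | none => rfl
    | some s =>
      simp only
      rw [pvBCollect_eq, ← List.map_drop, List.map_map]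
      have hfun2 : ((fun low => (stop_keywords.map PySem.Str.lower).any fun k => PySem.Str.isIn k low) ∘ PySem.Str.lower)
          = (fun l => (stop_keywords.map PySem.Str.lower).any fun k => PySem.Str.isIn k (PySem.Str.lower l)) := rfl
      rw [hfun2]
      cases ht : PySem.List.index? ((logs.drop s).map (fun l => (stop_keywords.map PySem.Str.lower).any fun k => PySem.Str.isIn k (PySem.Str.lower l))) true with
      | some j =>
        simp only
        rw [show ((s + j : Nat) : Int) = ((s : Nat) : Int) + ((j : Nat) : Int) by push_cast; ring,
            PySem.List.slice_natCast_add]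
      | none =>
        simp only
        rw [PySem.List.slice_natCast, List.take_of_length_le (by simp)]
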